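-- pv_equiv track=rewrite | github.com/nicolasdeclerck/homesweethome | foyer/services.py | compute_default_foyer_name
-- ===== SOURCE A (Python) =====
-- _DEFAULT_FOYER_NAME = "Mon foyer"
--
-- def compute_default_foyer_name(email: str) -> str:
--     """Calcule un nom de foyer par défaut depuis une adresse e-mail.
--
--     Extrait la partie locale (avant ``@``), prend le premier segment
--     avant ``.`` ou ``+``, ne garde que les caractères alphabétiques et
--     capitalise. Retourne ``"Foyer de {Nom}"`` si exploitable, sinon
--     ``"Mon foyer"``.
--     """
--     if not email or "@" not in email:
--         return _DEFAULT_FOYER_NAME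
--
--     local_part = email.split("@", 1)[0]
--     head = local_part.split(".")[0].split("+")[0]
--     cleaned = "".join(c for c in head if c.isalpha())
--
--     if not cleaned:
--         return _DEFAULT_FOYER_NAME
--
--     return f"Foyer de {cleaned.capitalize()}"
-- ===== SOURCE B (Python) =====
-- _DEFAULT_FOYER_NAME = "Mon foyer"
--
-- def compute_default_foyer_name(email: str) -> str:
--     # One left-to-right pass: collect alphabetic chars until the first '@', '.' or '+'.
--     if "@" not in email:
--         return _DEFAULT_FOYER_NAME
--     buf = []
--     for c in email:
--         if c == '@' or c == '.' or c == '+':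
--             break
--         if c.isalpha():
--             buf.append(c)
--     if not buf:
--         return _DEFAULT_FOYER_NAME
--     return "Foyer de " + "".join(buf).capitalize()
-- ===== Notes on version B (the rewrite author's own statement) =====
-- stated objective: simpler
-- what changed: B replaces A's chain of three splits plus a join-filter over intermediate lists by a single left-to-right scan with one accumulating buffer that stops at the first '@', '.' or '+' and keeps only alphabetic characters.
import Mathlib
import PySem

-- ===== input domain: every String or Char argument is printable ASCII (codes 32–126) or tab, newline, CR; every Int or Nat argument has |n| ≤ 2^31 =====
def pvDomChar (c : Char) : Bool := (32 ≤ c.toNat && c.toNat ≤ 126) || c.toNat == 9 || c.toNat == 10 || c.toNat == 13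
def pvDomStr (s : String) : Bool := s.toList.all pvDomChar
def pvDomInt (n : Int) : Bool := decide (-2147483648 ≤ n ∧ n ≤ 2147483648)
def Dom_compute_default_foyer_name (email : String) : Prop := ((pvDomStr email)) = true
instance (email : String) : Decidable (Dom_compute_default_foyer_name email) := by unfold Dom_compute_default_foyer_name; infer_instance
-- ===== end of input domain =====

-- B replaces A's chain of three splits plus a filtering join by a single left-to-right
-- scan with one accumulating buffer (objective: simpler).

-- Python str.capitalize, exact on ASCII (upper the first char, lower the rest);
-- PySem has no capitalize primitive, so it is ported by hand here, used by both ports.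
def pyCapitalize : List Char → List Char
  | [] => []
  | c :: cs => PySem.Chars.upperChar c :: cs.map PySem.Chars.lowerChar

-- ===== PORT A =====
def compute_default_foyer_name (email : String) : String :=
  if email.toList.isEmpty || !(PySem.Str.isIn "@" email) then "Mon foyer"
  else
    let local_part : String := ((PySem.Str.splitMax? email "@" 1).getD []).headD ""
    let head : String :=
      ((PySem.Str.split? (((PySem.Str.split? local_part ".").getD []).headD "") "+").getD []).headD ""
    let cleaned : List Char := head.toList.filter PySem.Chars.isalpha
    if cleaned.isEmpty then "Mon foyer"
    else String.ofList ("Foyer de ".toList ++ pyCapitalize cleaned)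

-- ===== PORT B =====
-- the scan loop of Source B: stop at the first '@', '.' or '+'; append alphabetic chars to buf
def altLoop : List Char → List Char → List Char
  | [], buf => buf
  | c :: rest, buf =>
    if c == '@' || c == '.' || c == '+' then buf
    else altLoop rest (if PySem.Chars.isalpha c then buf ++ [c] else buf)

def compute_default_foyer_name_alt (email : String) : String :=
  if !(PySem.Str.isIn "@" email) then "Mon foyer"
  else
    let buf := altLoop email.toList []
    if buf.isEmpty then "Mon foyer"
    else String.ofList ("Foyer de ".toList ++ pyCapitalize buf)

-- ===== PRECONDITION & SPEC =====
def Spec_compute_default_foyer_name (email : String) (out : String) : Prop := out = compute_default_foyer_name_alt email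
instance (email : String) (out : String) : Decidable (Spec_compute_default_foyer_name email out) := by unfold Spec_compute_default_foyer_name; infer_instance

-- ===== CLAIM (what is proved, stated in full; the proofs are below) =====
def Claim_equal_compute_default_foyer_name : Prop := ∀ (email : String), Dom_compute_default_foyer_name email → Spec_compute_default_foyer_name email (compute_default_foyer_name email)

-- ===== LEMMAS AND PROOFS =====

-- the splitOn worker always yields acc.reverse followed by at least one piece
theorem splitOn_go_shape (d : Char) :
    ∀ (fuel : Nat) (l cur : List Char) (accs : List (List Char)),
      ∃ x tail, PySem.Chars.splitOn.go [d] fuel l cur accs = accs.reverse ++ x :: tail := by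
  intro fuel
  induction fuel with
  | zero => intro l cur accs; exact ⟨cur.reverse ++ l, [], by simp [PySem.Chars.splitOn.go]⟩
  | succ f ih =>
    intro l cur accs
    cases l with
    | nil => exact ⟨cur.reverse, [], by simp [PySem.Chars.splitOn.go]⟩
    | cons c rest =>
      by_cases h : [d].isPrefixOf (c :: rest) = true
      · obtain ⟨x, tail, hx⟩ := ih (List.drop 1 (c :: rest)) [] (cur.reverse :: accs)
        exact ⟨cur.reverse, x :: tail, by simpa [PySem.Chars.splitOn.go, h] using hx⟩
      · obtain ⟨x, tail, hx⟩ := ih rest (c :: cur) accs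
        exact ⟨x, tail, by simpa [PySem.Chars.splitOn.go, h] using hx⟩

-- with enough fuel, the first piece produced is cur.reverse ++ the takeWhile prefix
theorem splitOn_go_head (d : Char) :
    ∀ (fuel : Nat) (l cur : List Char) (accs : List (List Char)), l.length ≤ fuel →
      ∃ tail, PySem.Chars.splitOn.go [d] fuel l cur accs
        = accs.reverse ++ (cur.reverse ++ l.takeWhile (· != d)) :: tail := by
  intro fuel
  induction fuel with
  | zero =>
    intro l cur accs hl
    have : l = [] := List.eq_nil_of_length_eq_zero (Nat.le_zero.mp hl)
    subst this
    exact ⟨[], by simp [PySem.Chars.splitOn.go]⟩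
  | succ f ih =>
    intro l cur accs hl
    cases l with
    | nil => exact ⟨[], by simp [PySem.Chars.splitOn.go]⟩
    | cons c rest =>
      by_cases h : [d].isPrefixOf (c :: rest) = true
      · have hcd : d = c := by simpa [List.isPrefixOf] using h
        obtain ⟨x, tail, hx⟩ := splitOn_go_shape d f (List.drop 1 (c :: rest)) [] (cur.reverse :: accs)
        refine ⟨x :: tail, ?_⟩
        subst hcd; simp only [List.drop] at hx; simp [PySem.Chars.splitOn.go, h, hx]
      · have hcd : ¬ d = c := by simpa [List.isPrefixOf] using h
        obtain ⟨tail, hx⟩ := ih rest (c :: cur) accs (by simpa using Nat.le_of_succ_le_succ hl)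
        refine ⟨tail, ?_⟩
        simp only [PySem.Chars.splitOn.go, h, Bool.false_eq_true, if_false, hx,
          List.takeWhile_cons, List.reverse_cons]
        simp [Ne.symm hcd]

-- s.split(d)[0] = the prefix of s before the first d
theorem splitOn_head_cons (d : Char) (l : List Char) :
    ∃ tail, PySem.Chars.splitOn l [d] = l.takeWhile (· != d) :: tail := by
  obtain ⟨tail, hx⟩ := splitOn_go_head d (l.length + 1) l [] [] (by omega)
  exact ⟨tail, by simpa [PySem.Chars.splitOn] using hx⟩

theorem splitOnMax_go_shape (d : Char) :
    ∀ (fuel : Nat) (m : Nat) (l cur : List Char) (accs : List (List Char)),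
      ∃ x tail, PySem.Chars.splitOnMax.go [d] fuel m l cur accs = accs.reverse ++ x :: tail := by
  intro fuel
  induction fuel with
  | zero => intro m l cur accs; exact ⟨cur.reverse ++ l, [], by simp [PySem.Chars.splitOnMax.go]⟩
  | succ f ih =>
    intro m l cur accs
    cases l with
    | nil => exact ⟨cur.reverse, [], by simp [PySem.Chars.splitOnMax.go]⟩
    | cons c rest =>
      by_cases hm : m = 0
      · exact ⟨cur.reverse ++ c :: rest, [], by simp [PySem.Chars.splitOnMax.go, hm]⟩
      · by_cases h : [d].isPrefixOf (c :: rest) = true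
        · obtain ⟨x, tail, hx⟩ := ih (m - 1) (List.drop 1 (c :: rest)) [] (cur.reverse :: accs)
          exact ⟨cur.reverse, x :: tail, by simpa [PySem.Chars.splitOnMax.go, h, hm] using hx⟩
        · obtain ⟨x, tail, hx⟩ := ih m rest (c :: cur) accs
          exact ⟨x, tail, by simpa [PySem.Chars.splitOnMax.go, h, hm] using hx⟩

theorem splitOnMax_go_head (d : Char) :
    ∀ (fuel : Nat) (m : Nat) (l cur : List Char) (accs : List (List Char)), m ≠ 0 → l.length ≤ fuel →
      ∃ tail, PySem.Chars.splitOnMax.go [d] fuel m l cur accs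
        = accs.reverse ++ (cur.reverse ++ l.takeWhile (· != d)) :: tail := by
  intro fuel
  induction fuel with
  | zero =>
    intro m l cur accs hm hl
    have : l = [] := List.eq_nil_of_length_eq_zero (Nat.le_zero.mp hl)
    subst this
    exact ⟨[], by simp [PySem.Chars.splitOnMax.go]⟩
  | succ f ih =>
    intro m l cur accs hm hl
    cases l with
    | nil => exact ⟨[], by simp [PySem.Chars.splitOnMax.go]⟩
    | cons c rest =>
      by_cases h : [d].isPrefixOf (c :: rest) = true
      · have hcd : d = c := by simpa [List.isPrefixOf] using h
        obtain ⟨x, tail, hx⟩ := splitOnMax_go_shape d f (m - 1) (List.drop 1 (c :: rest)) [] (cur.reverse :: accs)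
        refine ⟨x :: tail, ?_⟩
        subst hcd; simp only [List.drop] at hx; simp [PySem.Chars.splitOnMax.go, h, hm, hx]
      · have hcd : ¬ d = c := by simpa [List.isPrefixOf] using h
        obtain ⟨tail, hx⟩ := ih m rest (c :: cur) accs hm (by simpa using Nat.le_of_succ_le_succ hl)
        refine ⟨tail, ?_⟩
        simp only [PySem.Chars.splitOnMax.go, h, hm, Bool.false_eq_true, if_false, hx,
          List.takeWhile_cons, List.reverse_cons]
        simp [Ne.symm hcd]

-- s.split(d, 1)[0] = the prefix of s before the first d
theorem splitOnMax_one_head_cons (d : Char) (l : List Char) :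
    ∃ tail, PySem.Chars.splitOnMax l [d] 1 = l.takeWhile (· != d) :: tail := by
  obtain ⟨tail, hx⟩ := splitOnMax_go_head d (l.length + 1) 1 l [] [] (by omega) (by omega)
  exact ⟨tail, by simpa [PySem.Chars.splitOnMax] using hx⟩

-- B's scan = filter isalpha of the takeWhile prefix, appended to the buffer
theorem altLoop_spec (l buf : List Char) :
    altLoop l buf = buf ++ (l.takeWhile (fun c => !(c == '@' || c == '.' || c == '+'))).filter PySem.Chars.isalpha := by
  induction l generalizing buf with
  | nil => simp [altLoop]
  | cons c rest ih =>
    by_cases h : (c == '@' || c == '.' || c == '+') = true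
    · rw [altLoop, if_pos h, List.takeWhile_cons]
      rw [if_neg (by simp [h])]
      simp
    · have hp : (!(c == '@' || c == '.' || c == '+')) = true := by simp_all
      rw [altLoop, if_neg h, ih, List.takeWhile_cons, if_pos hp]
      by_cases ha : PySem.Chars.isalpha c = true <;>
        simp [ha, List.append_assoc]

-- A's three nested first-segment extractions collapse to one takeWhile
theorem takeWhile3 (l : List Char) :
    ((l.takeWhile (· != '@')).takeWhile (· != '.')).takeWhile (· != '+')
      = l.takeWhile (fun c => !(c == '@' || c == '.' || c == '+')) := by
  rw [List.takeWhile_takeWhile, List.takeWhile_takeWhile]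
  congr 1
  funext c
  by_cases h1 : c = '@' <;> by_cases h2 : c = '.' <;> by_cases h3 : c = '+' <;> simp_all

theorem main_eq (email : String) : compute_default_foyer_name email = compute_default_foyer_name_alt email := by
  unfold compute_default_foyer_name compute_default_foyer_name_alt
  by_cases hin : PySem.Str.isIn "@" email = true
  · have hne : email.toList.isEmpty = false := by
      rcases hemp : email.toList with _ | ⟨c, cs⟩
      · exfalso
        have := (PySem.Str.isIn_iff_infix (sub := "@") (s := email)).mp hin
        rw [hemp] at this
        simp at this
      · simp
    obtain ⟨t1, h1⟩ := splitOnMax_one_head_cons '@' email.toList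
    obtain ⟨t2, h2⟩ := splitOn_head_cons '.' (email.toList.takeWhile (· != '@'))
    obtain ⟨t3, h3⟩ := splitOn_head_cons '+' ((email.toList.takeWhile (· != '@')).takeWhile (· != '.'))
    simp only [hin, hne, Bool.not_true, Bool.or_false, Bool.false_eq_true, if_false,
      PySem.Str.splitMax?, PySem.Chars.splitMax?, PySem.Str.split?, PySem.Chars.split?]
    simp [h1, h2, h3, altLoop_spec, takeWhile3]
  · have hin' : PySem.Chars.isIn ['@'] email.toList = false := by
      simpa [PySem.Str.isIn] using hin
    simp [PySem.Str.isIn, hin']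

-- ===== VERDICT (by name: the statement is the Claim_ definition above) =====
theorem compute_default_foyer_name_spec : Claim_equal_compute_default_foyer_name := by
  intro email _
  unfold Spec_compute_default_foyer_name
  exact main_eq email
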